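-- pv_equiv track=rewrite | github.com/pillow12360/algorithm | dong_chan/Python/동아리/11월5주차_그래프탐색2/안전영역GPT.py | count_safe_areas
-- ===== SOURCE A (Python) =====
-- from collections import deque
--
-- def bfs(graph, visited, start, threshold):
--     n = len(graph)
--     dx = [-1, 0, 1, 0]
--     dy = [0, 1, 0, -1]
--
--     queue = deque([start])
--     visited[start[0]][start[1]] = True
--
--     while queue:
--         x, y = queue.popleft()
--
--         for i in range(4):
--             nx, ny = x + dx[i], y + dy[i]
--             if 0 <= nx < n and 0 <= ny < n and not visited[nx][ny] and graph[nx][ny] > threshold: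
--                 visited[nx][ny] = True
--                 queue.append((nx, ny))
--
-- def count_safe_areas(graph, max_height):
--     n = len(graph)
--     max_safe_area_count = 1  # 최소한 한 영역은 존재하므로 1로 초기화
--
--     for threshold in range(1, max_height + 1):
--         visited = [[False] * n for _ in range(n)]
--         safe_area_count = 0
--
--         for i in range(n):
--             for j in range(n):
--                 if not visited[i][j] and graph[i][j] > threshold:
--                     bfs(graph, visited, (i, j), threshold)
--                     safe_area_count += 1
--
--         max_safe_area_count = max(max_safe_area_count, safe_area_count)
--
--     return max_safe_area_count
-- ===== SOURCE B (Python) =====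
-- def count_safe_areas(graph, max_height):
--     # Connected-component counting by iterative min-label propagation (no flood fill):
--     # every safe cell starts labelled with its own index; labels relax to the minimum
--     # over adjacent safe cells until stable, so each component ends up uniformly
--     # labelled with its smallest cell index; components = cells keeping their own label.
--     n = len(graph)
--     best = 1
--     for threshold in range(1, max_height + 1):
--         label = [[(i * n + j if graph[i][j] > threshold else None) for j in range(n)]
--                  for i in range(n)]
--         changed = True
--         while changed:
--             changed = False
--             for i in range(n):
--                 for j in range(n):
--                     if label[i][j] is not None:
--                         m = label[i][j]
--                         for ni, nj in ((i - 1, j), (i + 1, j), (i, j - 1), (i, j + 1)):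
--                             if 0 <= ni < n and 0 <= nj < n and label[ni][nj] is not None and label[ni][nj] < m:
--                                 m = label[ni][nj]
--                         if m < label[i][j]:
--                             label[i][j] = m
--                             changed = True
--         count = 0
--         for i in range(n):
--             for j in range(n):
--                 if label[i][j] == i * n + j:
--                     count += 1
--         best = max(best, count)
--     return best
-- ===== Notes on version B (the rewrite author's own statement) =====
-- stated objective: alternative
-- what changed: A's per-threshold BFS flood fill (deque + visited matrix, counting fill starts) is replaced by connected-component counting via iterative minimum-label propagation: every safe cell starts labelled with its own index, labels relax to the minimum over adjacent safe cells until stable, and the component count is the number of cells that keep their own label.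
import Mathlib
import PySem

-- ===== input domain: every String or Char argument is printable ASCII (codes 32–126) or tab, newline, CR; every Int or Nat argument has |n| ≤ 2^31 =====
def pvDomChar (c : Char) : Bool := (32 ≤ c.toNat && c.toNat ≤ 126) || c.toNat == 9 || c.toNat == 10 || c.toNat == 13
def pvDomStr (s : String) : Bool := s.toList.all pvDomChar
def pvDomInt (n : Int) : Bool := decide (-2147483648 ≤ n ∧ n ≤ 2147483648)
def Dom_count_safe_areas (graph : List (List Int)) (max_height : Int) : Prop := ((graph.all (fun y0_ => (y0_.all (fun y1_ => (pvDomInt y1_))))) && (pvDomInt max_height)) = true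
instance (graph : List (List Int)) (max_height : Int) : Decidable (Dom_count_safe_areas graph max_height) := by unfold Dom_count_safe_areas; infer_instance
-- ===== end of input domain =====

-- B replaces A's per-threshold BFS flood fill (queue + visited matrix) by connected-component
-- counting via iterative minimum-label propagation: every safe cell starts labelled with its
-- own index, labels relax to the minimum over adjacent safe cells until stable, and the
-- component count is the number of cells keeping their own label (objective: alternative).

-- ===== PORT A =====
-- graph[x][y] (total form; used only under 0 ≤ x < n, 0 ≤ y < n guards; Pre_ excludes
-- the ragged grids on which Python's graph[x][y] would raise IndexError)
def gridGet (g : List (List Int)) (x y : Int) : Int :=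
  (PySem.List.pyGet? ((PySem.List.pyGet? g x).getD []) y).getD 0

-- visited[x][y] (total form; default `true` is never reached: reads are guarded by bounds)
def visGet (v : List (List Bool)) (x y : Int) : Bool :=
  (PySem.List.pyGet? ((PySem.List.pyGet? v x).getD []) y).getD true

-- visited[x][y] = True (indices are nonnegative and in range at every use)
def visSet (v : List (List Bool)) (x y : Int) : List (List Bool) :=
  v.modify x.toNat (fun row => row.set y.toNat true)

-- number of still-false entries of visited (termination measure only)
def falseCount (v : List (List Bool)) : Nat := (v.map (fun r => r.count false)).sum

-- the four (dx, dy) pairs, in A's order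
def dirsA : List (Int × Int) := [(-1, 0), (0, 1), (1, 0), (0, -1)]

-- body of A's `for i in range(4)` loop
def bfsStepA (g : List (List Int)) (n t x y : Int)
    (s : List (List Bool) × List (Int × Int)) (d : Int × Int) :
    List (List Bool) × List (Int × Int) :=
  if 0 ≤ x + d.1 ∧ x + d.1 < n ∧ 0 ≤ y + d.2 ∧ y + d.2 < n ∧
      visGet s.1 (x + d.1) (y + d.2) = false ∧ gridGet g (x + d.1) (y + d.2) > t
  then (visSet s.1 (x + d.1) (y + d.2), s.2 ++ [(x + d.1, y + d.2)])
  else s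

theorem count_set_false_lt (r : List Bool) (j : Nat) (h : r[j]? = some false) :
    (r.set j true).count false < r.count false := by
  induction r generalizing j with
  | nil => simp at h
  | cons b bs ih =>
    cases j with
    | zero =>
      simp at h; subst h
      simp
    | succ j =>
      simp at h
      have := ih j h
      simp [List.count_cons]
      omega

theorem falseCount_modify_lt (v : List (List Bool)) (i : Nat) (f : List Bool → List Bool)
    (r : List Bool) (hr : v[i]? = some r) (hf : (f r).count false < r.count false) :
    falseCount (v.modify i f) < falseCount v := by
  induction v generalizing i with
  | nil => simp at hr
  | cons a as ih =>
    cases i with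
    | zero => simp at hr; subst hr; simp [falseCount, List.modify]; omega
    | succ i =>
      simp at hr
      have := ih i hr
      simp [falseCount, List.modify] at this ⊢
      omega

theorem falseCount_visSet_lt (v : List (List Bool)) (x y : Int)
    (hx : 0 ≤ x) (hy : 0 ≤ y) (h : visGet v x y = false) :
    falseCount (visSet v x y) < falseCount v := by
  unfold visGet at h
  rw [PySem.List.pyGet?_of_nonneg _ hx] at h
  cases hrow : v[x.toNat]? with
  | none => rw [hrow] at h; rw [PySem.List.pyGet?_of_nonneg _ hy] at h; simp at h
  | some row =>
    rw [hrow] at h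
    simp only [Option.getD_some] at h
    rw [PySem.List.pyGet?_of_nonneg _ hy] at h
    cases hcell : row[y.toNat]? with
    | none => rw [hcell] at h; simp at h
    | some b =>
      rw [hcell] at h; simp at h; subst h
      exact falseCount_modify_lt v x.toNat _ row hrow (count_set_false_lt row y.toNat hcell)

theorem bfsFoldA_measure (g : List (List Int)) (n t x y : Int) :
    ∀ (dirs : List (Int × Int)) (s : List (List Bool) × List (Int × Int)),
      falseCount (dirs.foldl (bfsStepA g n t x y) s).1 < falseCount s.1 ∨
      dirs.foldl (bfsStepA g n t x y) s = s := by
  intro dirs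
  induction dirs with
  | nil => intro s; right; rfl
  | cons d ds ih =>
    intro s
    simp only [List.foldl_cons]
    rcases ih (bfsStepA g n t x y s d) with h | h
    · left
      have : falseCount (bfsStepA g n t x y s d).1 ≤ falseCount s.1 := by
        unfold bfsStepA
        split
        · rename_i hg
          exact le_of_lt (falseCount_visSet_lt _ _ _ hg.1 hg.2.2.1 hg.2.2.2.2.1)
        · exact le_refl _
      omega
    · rw [h]
      unfold bfsStepA
      split
      · rename_i hg
        left
        exact falseCount_visSet_lt _ _ _ hg.1 hg.2.2.1 hg.2.2.2.2.1
      · right; rfl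

-- A's `while queue:` loop (queue = FIFO: pop at the front, append at the back)
def bfsLoopA (g : List (List Int)) (t : Int) (v : List (List Bool))
    (q : List (Int × Int)) : List (List Bool) :=
  match q with
  | [] => v
  | (x, y) :: qs =>
    let s := dirsA.foldl (bfsStepA g g.length t x y) (v, qs)
    bfsLoopA g t s.1 s.2
termination_by (falseCount v, q.length)
decreasing_by
  rcases bfsFoldA_measure g g.length t x y dirsA (v, qs) with h | h
  · exact Prod.Lex.left _ _ h
  · rw [h]
    exact Prod.Lex.right _ (by simp)

-- Python's bfs(graph, visited, start, threshold) — returns the updated visited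
def bfsA (g : List (List Int)) (visited : List (List Bool)) (start : Int × Int)
    (t : Int) : List (List Bool) :=
  bfsLoopA g t (visSet visited start.1 start.2) [start]

-- body of A's scan over j (the `if not visited[i][j] and graph[i][j] > threshold` branch)
def scanStepA (g : List (List Int)) (t i : Int)
    (st : List (List Bool) × Int) (j : Int) : List (List Bool) × Int :=
  if visGet st.1 i j = false ∧ gridGet g i j > t
  then (bfsA g st.1 (i, j) t, st.2 + 1)
  else st

def count_safe_areas (graph : List (List Int)) (max_height : Int) : Int :=
  let n : Int := graph.length
  (PySem.List.pyRange 1 (max_height + 1) 1).foldl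
    (fun best t =>
      max best
        (((PySem.List.pyRange 0 n 1).foldl
            (fun st i => (PySem.List.pyRange 0 n 1).foldl (scanStepA graph t i) st)
            (List.replicate graph.length (List.replicate graph.length false), 0)).2))
    1

-- ===== PORT B =====
-- label[x][y] (total form; reads are index-guarded exactly as in Source B)
def labGet (L : List (List (Option Int))) (x y : Int) : Option Int :=
  (PySem.List.pyGet? ((PySem.List.pyGet? L x).getD []) y).getD none

-- label[x][y] = v (indices are nonnegative and in range at every use)
def labSet (L : List (List (Option Int))) (x y v : Int) : List (List (Option Int)) :=
  L.modify x.toNat (fun row => row.set y.toNat (some v))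

-- the initial label matrix comprehension of Source B
def initLab (g : List (List Int)) (n t : Int) : List (List (Option Int)) :=
  (PySem.List.pyRange 0 n 1).map (fun i =>
    (PySem.List.pyRange 0 n 1).map (fun j =>
      if gridGet g i j > t then some (i * n + j) else none))

-- the four neighbour candidates, in Source B's order
def nbrsB (x y : Int) : List (Int × Int) := [(x - 1, y), (x + 1, y), (x, y - 1), (x, y + 1)]

-- body of Source B's `for ni, nj in …` minimum computation
def nbrMinStep (L : List (List (Option Int))) (n : Int) (m : Int) (d : Int × Int) : Int :=
  if 0 ≤ d.1 ∧ d.1 < n ∧ 0 ≤ d.2 ∧ d.2 < n then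
    match labGet L d.1 d.2 with
    | some v => if v < m then v else m
    | none => m
  else m

-- body of Source B's per-cell relaxation
def sweepStep (n : Int) (s : List (List (Option Int)) × Bool) (c : Int × Int) :
    List (List (Option Int)) × Bool :=
  match labGet s.1 c.1 c.2 with
  | none => s
  | some cur =>
    let m := (nbrsB c.1 c.2).foldl (nbrMinStep s.1 n) cur
    if m < cur then (labSet s.1 c.1 c.2 m, true) else s

-- one full sweep over the grid (the body of the `while changed` loop)
def sweepB (n : Int) (L : List (List (Option Int))) : List (List (Option Int)) × Bool :=
  (PySem.List.pyRange 0 n 1).foldl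
    (fun st i => (PySem.List.pyRange 0 n 1).foldl (fun st j => sweepStep n st (i, j)) st)
    (L, false)

-- sum of all labels (fuel bound only)
def sumLab (L : List (List (Option Int))) : Nat :=
  (L.map (fun r => (r.map (fun o => (o.getD 0).toNat)).sum)).sum

-- Source B's `while changed` loop; the fuel is only a totality guard: every sweep that reports a
-- change strictly decreases the label sum, so `sumLab L + 1` sweeps always reach the fixpoint
def propLoop (n : Int) (fuel : Nat) (L : List (List (Option Int))) : List (List (Option Int)) :=
  match fuel with
  | 0 => L
  | fuel + 1 =>
    let s := sweepB n L
    if s.2 then propLoop n fuel s.1 else s.1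

-- Source B's final counting loops
def countLab (n : Int) (L : List (List (Option Int))) : Int :=
  (PySem.List.pyRange 0 n 1).foldl
    (fun acc i => (PySem.List.pyRange 0 n 1).foldl
      (fun acc j => if labGet L i j = some (i * n + j) then acc + 1 else acc) acc) 0

def count_safe_areas_alt (graph : List (List Int)) (max_height : Int) : Int :=
  let n : Int := graph.length
  (PySem.List.pyRange 1 (max_height + 1) 1).foldl
    (fun best t =>
      let L0 := initLab graph n t
      max best (countLab n (propLoop n (sumLab L0 + 1) L0)))
    1

-- ===== PRECONDITION & SPEC =====
-- Pre_ excludes exactly the inputs on which Python A raises IndexError: a ragged grid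
-- (some row shorter than len(graph)) is fully scanned as soon as max_height ≥ 1.
def Pre_count_safe_areas (graph : List (List Int)) (max_height : Int) : Prop :=
  max_height < 1 ∨ ∀ row ∈ graph, graph.length ≤ row.length
instance (graph : List (List Int)) (max_height : Int) : Decidable (Pre_count_safe_areas graph max_height) := by unfold Pre_count_safe_areas; infer_instance

def pvWitness_count_safe_areas : List (List Int) × Int := ([[2, 1], [1, 2]], 2)

def Spec_count_safe_areas (graph : List (List Int)) (max_height : Int) (out : Int) : Prop := out = count_safe_areas_alt graph max_height
instance (graph : List (List Int)) (max_height : Int) (out : Int) : Decidable (Spec_count_safe_areas graph max_height out) := by unfold Spec_count_safe_areas; infer_instance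

-- ===== CLAIM (what is proved, stated in full; the proofs are below) =====
def Claim_equal_count_safe_areas : Prop := ∀ (graph : List (List Int)) (max_height : Int), Dom_count_safe_areas graph max_height → Pre_count_safe_areas graph max_height → Spec_count_safe_areas graph max_height (count_safe_areas graph max_height)

-- ===== LEMMAS AND PROOFS =====

def inB (n : Int) (c : Int × Int) : Prop := 0 ≤ c.1 ∧ c.1 < n ∧ 0 ≤ c.2 ∧ c.2 < n

def goodP (g : List (List Int)) (n t : Int) (c : Int × Int) : Prop :=
  inB n c ∧ gridGet g c.1 c.2 > t

def isNbr (c d : Int × Int) : Prop :=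
  d = (c.1 - 1, c.2) ∨ d = (c.1 + 1, c.2) ∨ d = (c.1, c.2 - 1) ∨ d = (c.1, c.2 + 1)

-- connectivity of safe cells (the relation whose classes both programs count)
def connStep (g : List (List Int)) (n t : Int) (a b : Int × Int) : Prop :=
  goodP g n t a ∧ goodP g n t b ∧ isNbr a b

def conn (g : List (List Int)) (n t : Int) : (Int × Int) → (Int × Int) → Prop :=
  Relation.ReflTransGen (connStep g n t)

def idxI (n : Int) (c : Int × Int) : Int := c.1 * n + c.2

-- "c is the smallest cell of its safe component" — the set both programs count
def IsMinCell (g : List (List Int)) (n t : Int) (c : Int × Int) : Prop :=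
  goodP g n t c ∧ ∀ d, conn g n t c d → idxI n c ≤ idxI n d

-- cells already marked after the scan has processed the prefix P
def Mpred (g : List (List Int)) (n t : Int) (P : List (Int × Int)) (d : Int × Int) : Prop :=
  goodP g n t d ∧ ∃ p ∈ P, goodP g n t p ∧ conn g n t p d

def allCells (n : Int) : List (Int × Int) :=
  (PySem.List.pyRange 0 n 1).flatMap (fun i => (PySem.List.pyRange 0 n 1).map (fun j => (i, j)))

def relSafe (g : List (List Int)) (n t : Int) (V₀ : Int × Int → Prop) (c d : Int × Int) : Prop :=
  isNbr c d ∧ goodP g n t d ∧ ¬ V₀ d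

def Reach (g : List (List Int)) (n t : Int) (V₀ : Int × Int → Prop) (s c : Int × Int) : Prop :=
  Relation.ReflTransGen (relSafe g n t V₀) s c

-- the marked-cell predicate of A's visited matrix
def mA (n : Int) (v : List (List Bool)) (c : Int × Int) : Prop :=
  inB n c ∧ visGet v c.1 c.2 = true

-- the invariant A's flood-fill loop maintains
structure FloodInv (g : List (List Int)) (n t : Int) (V₀ : Int × Int → Prop)
    (s : Int × Int) (m : Int × Int → Prop) (p : List (Int × Int)) : Prop where
  hs : m s
  hsV : ¬ V₀ s
  hV : ∀ c, V₀ c → m c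
  hp : ∀ c ∈ p, m c ∧ Reach g n t V₀ s c
  hm : ∀ c, m c → V₀ c ∨ Reach g n t V₀ s c
  hcl : ∀ c, m c → ¬ V₀ c → c ∈ p ∨ ∀ d, isNbr c d → goodP g n t d → m d

theorem Reach_not_V₀ {g n t V₀ s b} (hs : ¬ V₀ s) (h : Reach g n t V₀ s b) : ¬ V₀ b := by
  induction h with
  | refl => exact hs
  | tail _ hrel _ => exact hrel.2.2

theorem FloodInv.step {g : List (List Int)} {n t : Int} {V₀ : Int × Int → Prop}
    {s : Int × Int} {m m' : Int × Int → Prop} {p p' Δ : List (Int × Int)} {c₀ : Int × Int}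
    (hInv : FloodInv g n t V₀ s m p) (hc₀ : c₀ ∈ p)
    (hm' : ∀ c, m' c ↔ m c ∨ c ∈ Δ)
    (hΔ : ∀ d ∈ Δ, isNbr c₀ d ∧ goodP g n t d ∧ ¬ m d)
    (hcov : ∀ d, isNbr c₀ d → goodP g n t d → m' d)
    (hp'sub : ∀ x ∈ p', x ∈ p ∨ x ∈ Δ)
    (hpkeep : ∀ x ∈ p, x = c₀ ∨ x ∈ p')
    (hΔp' : ∀ d ∈ Δ, d ∈ p') :
    FloodInv g n t V₀ s m' p' := by
  have hΔreach : ∀ d ∈ Δ, Reach g n t V₀ s d := by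
    intro d hd
    have hrc₀ := (hInv.hp c₀ hc₀).2
    refine hrc₀.tail ⟨(hΔ d hd).1, (hΔ d hd).2.1, ?_⟩
    intro hV
    exact (hΔ d hd).2.2 (hInv.hV d hV)
  refine ⟨?_, hInv.hsV, ?_, ?_, ?_, ?_⟩
  · exact (hm' s).mpr (Or.inl hInv.hs)
  · intro c hc; exact (hm' c).mpr (Or.inl (hInv.hV c hc))
  · intro c hc
    rcases hp'sub c hc with h | h
    · exact ⟨(hm' c).mpr (Or.inl (hInv.hp c h).1), (hInv.hp c h).2⟩
    · exact ⟨(hm' c).mpr (Or.inr h), hΔreach c h⟩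
  · intro c hc
    rcases (hm' c).mp hc with h | h
    · exact hInv.hm c h
    · exact Or.inr (hΔreach c h)
  · intro c hc hV
    rcases (hm' c).mp hc with h | h
    · rcases hInv.hcl c h hV with hin | hclosed
      · rcases hpkeep c hin with rfl | hin'
        · exact Or.inr hcov
        · exact Or.inl hin'
      · exact Or.inr (fun d hnd hgd => (hm' d).mpr (Or.inl (hclosed d hnd hgd)))
    · exact Or.inl (hΔp' c h)

theorem FloodInv.final {g n t V₀ s m} (hInv : FloodInv g n t V₀ s m ([] : List (Int × Int))) :
    ∀ c, m c ↔ (V₀ c ∨ Reach g n t V₀ s c) := by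
  intro c
  constructor
  · exact hInv.hm c
  · rintro (h | h)
    · exact hInv.hV c h
    · induction h with
      | refl => exact hInv.hs
      | tail hr hrel ih =>
        rename_i b c'
        have hb := ih
        have hbV : ¬ V₀ b := Reach_not_V₀ hInv.hsV hr
        rcases hInv.hcl b hb hbV with h | hclosed
        · simp at h
        · exact hclosed c' hrel.1 hrel.2.1

theorem visGet_false_elim {v : List (List Bool)} {x y : Int}
    (hx : 0 ≤ x) (hy : 0 ≤ y) (h : visGet v x y = false) :
    ∃ row, v[x.toNat]? = some row ∧ row[y.toNat]? = some false := by
  unfold visGet at h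
  rw [PySem.List.pyGet?_of_nonneg _ hx] at h
  cases hrow : v[x.toNat]? with
  | none => rw [hrow] at h; rw [PySem.List.pyGet?_of_nonneg _ hy] at h; simp at h
  | some row =>
    rw [hrow] at h
    simp only [Option.getD_some] at h
    rw [PySem.List.pyGet?_of_nonneg _ hy] at h
    cases hcell : row[y.toNat]? with
    | none => rw [hcell] at h; simp at h
    | some b => rw [hcell] at h; simp at h; subst h; exact ⟨row, rfl, hcell⟩

theorem visGet_visSet_same {v : List (List Bool)} {x y : Int}
    (hx : 0 ≤ x) (hy : 0 ≤ y) (h : visGet v x y = false) :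
    visGet (visSet v x y) x y = true := by
  obtain ⟨row, hrow, hcell⟩ := visGet_false_elim hx hy h
  have hylen : y.toNat < row.length := (List.getElem?_eq_some_iff.mp hcell).1
  unfold visGet visSet
  rw [PySem.List.pyGet?_of_nonneg _ hx, List.getElem?_modify, hrow]
  simp [PySem.List.pyGet?_of_nonneg _ hy, List.getElem?_set_self hylen]

theorem visGet_visSet_other {v : List (List Bool)} {x y a b : Int}
    (hx : 0 ≤ x) (hy : 0 ≤ y) (ha : 0 ≤ a) (hb : 0 ≤ b) (hne : (a, b) ≠ (x, y)) :
    visGet (visSet v x y) a b = visGet v a b := by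
  unfold visGet visSet
  rw [PySem.List.pyGet?_of_nonneg _ ha, PySem.List.pyGet?_of_nonneg v ha,
    List.getElem?_modify]
  by_cases hax : x.toNat = a.toNat
  · have hax' : a = x := by omega
    subst hax'
    have hbey : b ≠ y := by
      intro hcc; exact hne (by rw [hcc])
    cases hrow : v[a.toNat]? with
    | none => simp
    | some row =>
      simp [PySem.List.pyGet?_of_nonneg, hb,
        List.getElem?_set_ne (show y.toNat ≠ b.toNat by omega)]
  · simp [hax]

theorem mA_visSet {n : Int} (v : List (List Bool)) {x y : Int}
    (hxb : inB n (x, y)) (hvis : visGet v x y = false) :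
    ∀ c, mA n (visSet v x y) c ↔ (mA n v c ∨ c = (x, y)) := by
  intro c
  by_cases hc : c = (x, y)
  · subst hc
    simp only [mA]
    constructor
    · intro _; right; trivial
    · intro _
      exact ⟨hxb, visGet_visSet_same hxb.1 hxb.2.2.1 hvis⟩
  · by_cases hcb : inB n c
    · have hother : visGet (visSet v x y) c.1 c.2 = visGet v c.1 c.2 :=
        visGet_visSet_other hxb.1 hxb.2.2.1 hcb.1 hcb.2.2.1
          (by intro hcc; exact hc (by rw [← hcc]))
      simp [mA, hother, hc]
    · simp [mA, hcb, hc]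

theorem not_mA_of_visGet_false {n : Int} {v : List (List Bool)} {x y : Int}
    (h : visGet v x y = false) : ¬ mA n v (x, y) := by
  intro hm
  rw [hm.2] at h
  simp at h

theorem foldA_spec (g : List (List Int)) (n t x y : Int) :
    ∀ (dirs : List (Int × Int)) (v : List (List Bool)) (q : List (Int × Int)),
    ∃ Δ : List (Int × Int),
      (dirs.foldl (bfsStepA g n t x y) (v, q)).2 = q ++ Δ ∧
      (∀ c, mA n (dirs.foldl (bfsStepA g n t x y) (v, q)).1 c ↔ (mA n v c ∨ c ∈ Δ)) ∧
      (∀ d ∈ Δ, (∃ p ∈ dirs, d = (x + p.1, y + p.2)) ∧ goodP g n t d ∧ ¬ mA n v d) ∧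
      (∀ p ∈ dirs, goodP g n t (x + p.1, y + p.2) →
        mA n (dirs.foldl (bfsStepA g n t x y) (v, q)).1 (x + p.1, y + p.2)) := by
  intro dirs
  induction dirs with
  | nil =>
    intro v q
    exact ⟨[], by simp, by simp, by simp, by simp⟩
  | cons d ds ih =>
    intro v q
    simp only [List.foldl_cons]
    by_cases hg : 0 ≤ x + d.1 ∧ x + d.1 < n ∧ 0 ≤ y + d.2 ∧ y + d.2 < n ∧
        visGet v (x + d.1) (y + d.2) = false ∧ gridGet g (x + d.1) (y + d.2) > t
    · rw [show bfsStepA g n t x y (v, q) d =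
          (visSet v (x + d.1) (y + d.2), q ++ [(x + d.1, y + d.2)]) by
        unfold bfsStepA; rw [if_pos hg]]
      obtain ⟨Δ', h1, h2, h3, h4⟩ := ih (visSet v (x + d.1) (y + d.2)) (q ++ [(x + d.1, y + d.2)])
      have hxb : inB n (x + d.1, y + d.2) := ⟨hg.1, hg.2.1, hg.2.2.1, hg.2.2.2.1⟩
      have hmk := mA_visSet v hxb hg.2.2.2.2.1
      refine ⟨(x + d.1, y + d.2) :: Δ', ?_, ?_, ?_, ?_⟩
      · rw [h1]; simp
      · intro c
        rw [h2 c, hmk c]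
        simp only [List.mem_cons]
        tauto
      · intro e he
        rcases List.mem_cons.mp he with rfl | he'
        · exact ⟨⟨d, List.mem_cons_self .., rfl⟩,
            ⟨hxb, hg.2.2.2.2.2⟩, not_mA_of_visGet_false hg.2.2.2.2.1⟩
        · obtain ⟨⟨p, hp, hdp⟩, hgood, hnm⟩ := h3 e he'
          refine ⟨⟨p, List.mem_cons_of_mem _ hp, hdp⟩, hgood, ?_⟩
          intro hm
          exact hnm ((hmk e).mpr (Or.inl hm))
      · intro p hp hgood
        rcases List.mem_cons.mp hp with rfl | hp'
        · exact (h2 _).mpr (Or.inl ((hmk _).mpr (Or.inr rfl)))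
        · exact h4 p hp' hgood
    · rw [show bfsStepA g n t x y (v, q) d = (v, q) by unfold bfsStepA; rw [if_neg hg]]
      obtain ⟨Δ', h1, h2, h3, h4⟩ := ih v q
      refine ⟨Δ', h1, h2, ?_, ?_⟩
      · intro e he
        obtain ⟨⟨p, hp, hdp⟩, hgood, hnm⟩ := h3 e he
        exact ⟨⟨p, List.mem_cons_of_mem _ hp, hdp⟩, hgood, hnm⟩
      intro p hp hgood
      rcases List.mem_cons.mp hp with rfl | hp'
      · have hvis : visGet v (x + p.1) (y + p.2) = true := by
          cases hv : visGet v (x + p.1) (y + p.2) with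
          | false =>
            exact absurd ⟨hgood.1.1, hgood.1.2.1, hgood.1.2.2.1, hgood.1.2.2.2, hv, hgood.2⟩ hg
          | true => rfl
        exact (h2 _).mpr (Or.inl ⟨hgood.1, hvis⟩)
      · exact h4 p hp' hgood

theorem isNbr_iff_dirsA {x y : Int} (e : Int × Int) :
    (∃ p ∈ dirsA, e = (x + p.1, y + p.2)) ↔ isNbr (x, y) e := by
  simp only [dirsA, isNbr, List.mem_cons, List.not_mem_nil, or_false]
  constructor
  · rintro ⟨p, hp, rfl⟩
    rcases hp with rfl | rfl | rfl | rfl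
    · left; rw [Prod.mk.injEq]; omega
    · right; right; right; rw [Prod.mk.injEq]; omega
    · right; left; rw [Prod.mk.injEq]; omega
    · right; right; left; rw [Prod.mk.injEq]; omega
  · rintro (rfl | rfl | rfl | rfl)
    · exact ⟨(-1, 0), Or.inl rfl, by rw [Prod.mk.injEq]; omega⟩
    · exact ⟨(1, 0), Or.inr (Or.inr (Or.inl rfl)), by rw [Prod.mk.injEq]; omega⟩
    · exact ⟨(0, -1), Or.inr (Or.inr (Or.inr rfl)), by rw [Prod.mk.injEq]; omega⟩
    · exact ⟨(0, 1), Or.inr (Or.inl rfl), by rw [Prod.mk.injEq]; omega⟩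

theorem bfsLoopA_final (g : List (List Int)) (t : Int) (V₀ : Int × Int → Prop) (s₀ : Int × Int) :
    ∀ (v : List (List Bool)) (q : List (Int × Int)),
    FloodInv g g.length t V₀ s₀ (mA g.length v) q →
    ∀ c, mA g.length (bfsLoopA g t v q) c ↔ (V₀ c ∨ Reach g g.length t V₀ s₀ c) := by
  intro v q
  fun_induction bfsLoopA g t v q with
  | case1 v => intro hInv; exact hInv.final
  | case2 v x y qs s ih =>
    intro hInv
    obtain ⟨Δ, h1, h2, h3, h4⟩ := foldA_spec g g.length t x y dirsA v qs
    apply ih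
    rw [show s.2 = qs ++ Δ from h1]
    refine hInv.step (c₀ := (x, y)) (Δ := Δ) (List.mem_cons_self ..) h2 ?_ ?_ ?_ ?_ ?_
    · intro d hd
      obtain ⟨hex, hgood, hnm⟩ := h3 d hd
      exact ⟨(isNbr_iff_dirsA d).mp hex, hgood, hnm⟩
    · intro d hnd hgd
      obtain ⟨p, hp, rfl⟩ := (isNbr_iff_dirsA d).mpr hnd
      exact h4 p hp hgd
    · intro e he
      rcases List.mem_append.mp he with h | h
      · exact Or.inl (List.mem_cons_of_mem _ h)
      · exact Or.inr h
    · intro e he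
      rcases List.mem_cons.mp he with rfl | h
      · exact Or.inl rfl
      · exact Or.inr (List.mem_append.mpr (Or.inl h))
    · intro d hd
      exact List.mem_append.mpr (Or.inr hd)

theorem mA_init (nn : Nat) (c : Int × Int) :
    ¬ mA (nn : Int) (List.replicate nn (List.replicate nn false)) c := by
  rintro ⟨hin, hvis⟩
  obtain ⟨h1, h2, h3, h4⟩ := hin
  unfold visGet at hvis
  rw [PySem.List.pyGet?_of_nonneg _ h1] at hvis
  rw [List.getElem?_replicate_of_lt (by omega)] at hvis
  simp only [Option.getD_some] at hvis
  rw [PySem.List.pyGet?_of_nonneg _ h3] at hvis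
  rw [List.getElem?_replicate_of_lt (by omega)] at hvis
  simp at hvis

-- ---------- generic grid facts ----------

theorem isNbr_symm {c d : Int × Int} (h : isNbr c d) : isNbr d c := by
  obtain ⟨cx, cy⟩ := c; obtain ⟨dx, dy⟩ := d
  simp only [isNbr, Prod.mk.injEq] at h ⊢
  omega

theorem conn_symm {g : List (List Int)} {n t : Int} {a b : Int × Int}
    (h : conn g n t a b) : conn g n t b a :=
  Relation.ReflTransGen.symmetric
    (fun _ _ hs => ⟨hs.2.1, hs.1, isNbr_symm hs.2.2⟩) h

theorem conn_good {g : List (List Int)} {n t : Int} {a b : Int × Int}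
    (h : conn g n t a b) (ha : goodP g n t a) : goodP g n t b := by
  induction h with
  | refl => exact ha
  | tail _ hs _ => exact hs.2.1

theorem mem_allCells {n : Int} {c : Int × Int} : c ∈ allCells n ↔ inB n c := by
  obtain ⟨x, y⟩ := c
  simp only [allCells, List.mem_flatMap, List.mem_map, PySem.List.mem_pyRange_one,
    Prod.mk.injEq, inB]
  constructor
  · rintro ⟨i, hi, j, hj, rfl, rfl⟩; exact ⟨hi.1, hi.2, hj.1, hj.2⟩
  · rintro ⟨h1, h2, h3, h4⟩; exact ⟨x, ⟨h1, h2⟩, y, ⟨h3, h4⟩, rfl, rfl⟩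

theorem allCells_pairwise (n : Int) :
    (allCells n).Pairwise (fun a b => idxI n a < idxI n b) := by
  unfold allCells
  rw [List.pairwise_flatMap]
  constructor
  · intro i _
    rw [List.pairwise_map]
    refine List.Pairwise.imp ?_ (PySem.List.pairwise_lt_pyRange_one 0 n)
    intro j j' h
    simpa [idxI] using add_lt_add_left h (i * n)
  · refine List.Pairwise.imp ?_ (PySem.List.pairwise_lt_pyRange_one 0 n)
    intro i i' hii x hx y hy
    obtain ⟨j, hj, rfl⟩ := List.mem_map.mp hx
    obtain ⟨j', hj', rfl⟩ := List.mem_map.mp hy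
    rw [PySem.List.mem_pyRange_one] at hj hj'
    simp only [idxI]
    have h1 : i * n + j < (i + 1) * n := by nlinarith [hj.2]
    have h2 : (i + 1) * n ≤ i' * n := by nlinarith [hj.1, hj.2]
    omega

theorem getElem?_pyRange (b : Int) : ∀ (k : Nat) (a : Int), a + k < b →
    (PySem.List.pyRange a b 1)[k]? = some (a + k) := by
  intro k
  induction k with
  | zero =>
    intro a h
    rw [PySem.List.pyRange_one_cons (by omega)]
    simp
  | succ k ih =>
    intro a h
    rw [PySem.List.pyRange_one_cons (by omega)]
    have := ih (a + 1) (by omega)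
    simp only [List.getElem?_cons_succ]
    rw [this]
    congr 1
    push_cast
    ring

-- ---------- A side: the scan counter counts component minima ----------

theorem reach_eq_conn {g : List (List Int)} {n t : Int} {P : List (Int × Int)} {c : Int × Int}
    (hgc : goodP g n t c) (hcM : ¬ Mpred g n t P c) :
    ∀ d, Reach g n t (Mpred g n t P) c d ↔ conn g n t c d := by
  intro d
  constructor
  · intro h
    induction h with
    | refl => exact Relation.ReflTransGen.refl
    | tail hr hs ih => exact ih.tail ⟨conn_good ih hgc, hs.2.1, hs.1⟩
  · intro h
    induction h with
    | refl => exact Relation.ReflTransGen.refl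
    | @tail b e hr hs ih =>
      refine ih.tail ⟨hs.2.2, hs.2.1, ?_⟩
      intro hMd
      obtain ⟨hgd, p, hpP, hgp, hpd⟩ := hMd
      exact hcM ⟨hgc, p, hpP, hgp, hpd.trans (conn_symm (hr.tail hs))⟩

theorem bfsA_marks {g : List (List Int)} {t : Int} {P : List (Int × Int)}
    {v : List (List Bool)} {c : Int × Int}
    (hM : ∀ d, mA g.length v d ↔ Mpred g g.length t P d)
    (hgc : goodP g g.length t c) (hvis : visGet v c.1 c.2 = false) :
    ∀ d, mA g.length (bfsA g v c t) d ↔ Mpred g g.length t (P ++ [c]) d := by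
  intro d
  obtain ⟨x, y⟩ := c
  have hxb : inB (g.length : Int) (x, y) := hgc.1
  have hnA : ¬ mA (g.length : Int) v (x, y) := not_mA_of_visGet_false hvis
  have hcM : ¬ Mpred g g.length t P (x, y) := fun hMc => hnA ((hM _).mpr hMc)
  have hmk := mA_visSet v hxb hvis
  have hInv : FloodInv g g.length t (Mpred g g.length t P) (x, y)
      (mA g.length (visSet v x y)) [(x, y)] := by
    refine ⟨(hmk _).mpr (Or.inr rfl), hcM, ?_, ?_, ?_, ?_⟩
    · intro e he; exact (hmk e).mpr (Or.inl ((hM e).mpr he))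
    · intro e he
      rw [List.mem_singleton.mp he]
      exact ⟨(hmk _).mpr (Or.inr rfl), Relation.ReflTransGen.refl⟩
    · intro e he
      rcases (hmk e).mp he with h | rfl
      · exact Or.inl ((hM e).mp h)
      · exact Or.inr Relation.ReflTransGen.refl
    · intro e he hV
      rcases (hmk e).mp he with h | rfl
      · exact absurd ((hM e).mp h) hV
      · exact Or.inl (List.mem_singleton.mpr rfl)
  have hfin := bfsLoopA_final g t (Mpred g g.length t P) (x, y) _ _ hInv d
  rw [show bfsA g v (x, y) t = bfsLoopA g t (visSet v x y) [(x, y)] from rfl]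
  rw [hfin, reach_eq_conn hgc hcM d]
  constructor
  · rintro (h | h)
    · obtain ⟨hgd, p, hpP, hgp, hpd⟩ := h
      exact ⟨hgd, p, List.mem_append.mpr (Or.inl hpP), hgp, hpd⟩
    · exact ⟨conn_good h hgc, (x, y), List.mem_append.mpr (Or.inr (List.mem_singleton.mpr rfl)),
        hgc, h⟩
  · rintro ⟨hgd, p, hpP, hgp, hpd⟩
    rcases List.mem_append.mp hpP with h | h
    · exact Or.inl ⟨hgd, p, h, hgp, hpd⟩
    · rw [List.mem_singleton.mp h] at hpd
      exact Or.inr hpd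

theorem scanA_inv (g : List (List Int)) (t : Int) (q : Int × Int → Bool)
    (hq : ∀ c, inB (g.length : Int) c → (q c = true ↔ IsMinCell g (g.length : Int) t c)) :
    ∀ (Q P : List (Int × Int)) (v : List (List Bool)) (cnt : Int),
    allCells g.length = P ++ Q →
    (∀ d, mA g.length v d ↔ Mpred g g.length t P d) →
    (Q.foldl (fun st c => scanStepA g t c.1 st c.2) (v, cnt)).2
      = cnt + (Q.countP q : Int) := by
  intro Q
  induction Q with
  | nil => intro P v cnt _ _; simp
  | cons c Q' ih =>
    intro P v cnt hsplit hM
    have hpw : (P ++ c :: Q').Pairwise (fun a b => idxI (g.length : Int) a < idxI (g.length : Int) b) := by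
      rw [← hsplit]; exact allCells_pairwise _
    obtain ⟨hpwP, hpwQ, hcross⟩ := List.pairwise_append.mp hpw
    have hPlt : ∀ p ∈ P, idxI (g.length : Int) p < idxI (g.length : Int) c :=
      fun p hp => hcross p hp c (List.mem_cons_self ..)
    have hQgt : ∀ e ∈ Q', idxI (g.length : Int) c < idxI (g.length : Int) e :=
      (List.pairwise_cons.mp hpwQ).1
    have hcin : inB (g.length : Int) c := by
      rw [← mem_allCells, hsplit]
      exact List.mem_append.mpr (Or.inr (List.mem_cons_self ..))
    have hdP : ∀ d, inB (g.length : Int) d →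
        idxI (g.length : Int) d < idxI (g.length : Int) c → d ∈ P := by
      intro d hd hlt
      have : d ∈ P ++ c :: Q' := by rw [← hsplit]; exact mem_allCells.mpr hd
      rcases List.mem_append.mp this with h | h
      · exact h
      · rcases List.mem_cons.mp h with rfl | h
        · omega
        · exact absurd (hQgt d h) (by omega)
    have hsplit' : allCells (g.length : Int) = (P ++ [c]) ++ Q' := by
      rw [hsplit, List.append_assoc, List.singleton_append]
    simp only [List.foldl_cons]
    by_cases hgood : gridGet g c.1 c.2 > t
    · by_cases hvisd : visGet v c.1 c.2 = false
      · -- fresh safe cell: it is the minimum of its component, counter increments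
        have hgc : goodP g (g.length : Int) t c := ⟨hcin, hgood⟩
        have hcM : ¬ Mpred g g.length t P c := by
          intro hMc
          have := ((hM c).mpr hMc).2
          rw [hvisd] at this; exact absurd this (by simp)
        have hmin : IsMinCell g (g.length : Int) t c := by
          refine ⟨hgc, ?_⟩
          intro d hcd
          by_contra hlt
          have hgd : goodP g (g.length : Int) t d := conn_good hcd hgc
          have hdP' : d ∈ P := hdP d hgd.1 (by omega)
          exact hcM ⟨hgc, d, hdP', hgd, conn_symm hcd⟩
        have hqc : q c = true := (hq c hcin).mpr hmin
        have hstep : scanStepA g t c.1 (v, cnt) c.2 = (bfsA g v (c.1, c.2) t, cnt + 1) := by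
          unfold scanStepA; rw [if_pos ⟨hvisd, hgood⟩]
        rw [hstep]
        have hM' := bfsA_marks (P := P) hM hgc hvisd
        have := ih (P ++ [c]) (bfsA g v (c.1, c.2) t) (cnt + 1) hsplit' (by
          intro d
          have := hM' d
          simpa using this)
        rw [this, List.countP_cons, hqc]
        simp only [if_true]
        push_cast
        omega
      · -- already-visited safe cell: some smaller connected cell was scanned before
        have hvisT : visGet v c.1 c.2 = true := by
          revert hvisd; cases visGet v c.1 c.2 <;> simp
        have hMc : Mpred g g.length t P c := (hM c).mp ⟨hcin, hvisT⟩
        have hqc : q c = false := by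
          by_contra hqt
          have hqt' : q c = true := by revert hqt; cases q c <;> simp
          obtain ⟨_, p, hpP, hgp, hpc⟩ := hMc
          have := ((hq c hcin).mp hqt').2 p (conn_symm hpc)
          exact absurd (hPlt p hpP) (by omega)
        have hstep : scanStepA g t c.1 (v, cnt) c.2 = (v, cnt) := by
          unfold scanStepA; rw [if_neg (by simp [hvisd])]
        rw [hstep]
        have hM' : ∀ d, mA g.length v d ↔ Mpred g g.length t (P ++ [c]) d := by
          intro d
          rw [hM d]
          constructor
          · rintro ⟨hgd, p, hpP, hgp, hpd⟩
            exact ⟨hgd, p, List.mem_append.mpr (Or.inl hpP), hgp, hpd⟩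
          · rintro ⟨hgd, p, hpP, hgp, hpd⟩
            rcases List.mem_append.mp hpP with h | h
            · exact ⟨hgd, p, h, hgp, hpd⟩
            · rw [List.mem_singleton.mp h] at hpd
              obtain ⟨_, p₀, hp₀, hgp₀, hp₀c⟩ := hMc
              exact ⟨hgd, p₀, hp₀, hgp₀, hp₀c.trans hpd⟩
        rw [ih (P ++ [c]) v cnt hsplit' hM', List.countP_cons, hqc]
        simp
    · -- unsafe cell: skipped, not a minimum, marks unchanged
      have hqc : q c = false := by
        by_contra hqt
        have hqt' : q c = true := by revert hqt; cases q c <;> simp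
        exact hgood ((hq c hcin).mp hqt').1.2
      have hstep : scanStepA g t c.1 (v, cnt) c.2 = (v, cnt) := by
        unfold scanStepA; rw [if_neg (by simp [hgood])]
      rw [hstep]
      have hM' : ∀ d, mA g.length v d ↔ Mpred g g.length t (P ++ [c]) d := by
        intro d
        rw [hM d]
        constructor
        · rintro ⟨hgd, p, hpP, hgp, hpd⟩
          exact ⟨hgd, p, List.mem_append.mpr (Or.inl hpP), hgp, hpd⟩
        · rintro ⟨hgd, p, hpP, hgp, hpd⟩
          rcases List.mem_append.mp hpP with h | h
          · exact ⟨hgd, p, h, hgp, hpd⟩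
          · rw [List.mem_singleton.mp h] at hgp
            exact absurd hgp.2 hgood
      rw [ih (P ++ [c]) v cnt hsplit' hM', List.countP_cons, hqc]
      simp

-- ---------- B side: the propagation fixpoint labels component minima ----------

theorem labGet_some_elim {L : List (List (Option Int))} {x y m : Int}
    (hx : 0 ≤ x) (hy : 0 ≤ y) (h : labGet L x y = some m) :
    ∃ row, L[x.toNat]? = some row ∧ row[y.toNat]? = some (some m) := by
  unfold labGet at h
  rw [PySem.List.pyGet?_of_nonneg _ hx] at h
  cases hrow : L[x.toNat]? with
  | none => rw [hrow] at h; rw [PySem.List.pyGet?_of_nonneg _ hy] at h; simp at h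
  | some row =>
    rw [hrow] at h
    simp only [Option.getD_some] at h
    rw [PySem.List.pyGet?_of_nonneg _ hy] at h
    cases hcell : row[y.toNat]? with
    | none => rw [hcell] at h; simp at h
    | some b => rw [hcell] at h; simp at h; subst h; exact ⟨row, rfl, hcell⟩

theorem labGet_labSet_same {L : List (List (Option Int))} {x y cur : Int} (v : Int)
    (hx : 0 ≤ x) (hy : 0 ≤ y) (h : labGet L x y = some cur) :
    labGet (labSet L x y v) x y = some v := by
  obtain ⟨row, hrow, hcell⟩ := labGet_some_elim hx hy h
  have hylen : y.toNat < row.length := (List.getElem?_eq_some_iff.mp hcell).1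
  unfold labGet labSet
  rw [PySem.List.pyGet?_of_nonneg _ hx, List.getElem?_modify, hrow]
  simp [PySem.List.pyGet?_of_nonneg _ hy, List.getElem?_set_self hylen]

theorem labGet_labSet_other {L : List (List (Option Int))} {x y a b : Int} (v : Int)
    (hx : 0 ≤ x) (hy : 0 ≤ y) (ha : 0 ≤ a) (hb : 0 ≤ b) (hne : (a, b) ≠ (x, y)) :
    labGet (labSet L x y v) a b = labGet L a b := by
  unfold labGet labSet
  rw [PySem.List.pyGet?_of_nonneg _ ha, PySem.List.pyGet?_of_nonneg L ha,
    List.getElem?_modify]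
  by_cases hax : x.toNat = a.toNat
  · have hax' : a = x := by omega
    subst hax'
    have hbey : b ≠ y := by
      intro hcc; exact hne (by rw [hcc])
    cases hrow : L[a.toNat]? with
    | none => simp
    | some row =>
      simp [PySem.List.pyGet?_of_nonneg, hb,
        List.getElem?_set_ne (show y.toNat ≠ b.toNat by omega)]
  · simp [hax]

-- the invariant every label matrix of the propagation satisfies
def InvL (g : List (List Int)) (n t : Int) (L : List (List (Option Int))) : Prop :=
  ∀ c : Int × Int, inB n c →
    (labGet L c.1 c.2 = none → ¬ goodP g n t c) ∧
    (∀ m, labGet L c.1 c.2 = some m →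
      goodP g n t c ∧ m ≤ idxI n c ∧ ∃ d, conn g n t c d ∧ m = idxI n d)

-- the per-cell stability condition a fixpoint satisfies
def StableAt (n : Int) (L : List (List (Option Int))) (c : Int × Int) : Prop :=
  ∀ cur, labGet L c.1 c.2 = some cur →
    ∀ d ∈ nbrsB c.1 c.2, (0 ≤ d.1 ∧ d.1 < n ∧ 0 ≤ d.2 ∧ d.2 < n) →
      ∀ v, labGet L d.1 d.2 = some v → cur ≤ v

theorem getElem?_pyRange_toNat {n i : Int} (h0 : 0 ≤ i) (h : i < n) :
    (PySem.List.pyRange 0 n 1)[i.toNat]? = some i := by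
  have := getElem?_pyRange n i.toNat 0 (by omega)
  rw [this]
  congr 1
  omega

theorem labGet_initLab {g : List (List Int)} {n t : Int} {c : Int × Int} (h : inB n c) :
    labGet (initLab g n t) c.1 c.2
      = if gridGet g c.1 c.2 > t then some (idxI n c) else none := by
  obtain ⟨h1, h2, h3, h4⟩ := h
  unfold labGet initLab
  rw [PySem.List.pyGet?_of_nonneg _ h1, List.getElem?_map, getElem?_pyRange_toNat h1 h2]
  simp only [Option.map_some, Option.getD_some]
  rw [PySem.List.pyGet?_of_nonneg _ h3, List.getElem?_map, getElem?_pyRange_toNat h3 h4]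
  simp only [Option.map_some, Option.getD_some, idxI]

theorem InvL_initLab (g : List (List Int)) (n t : Int) : InvL g n t (initLab g n t) := by
  intro c hc
  rw [labGet_initLab hc]
  by_cases hg : gridGet g c.1 c.2 > t
  · rw [if_pos hg]
    refine ⟨by simp, ?_⟩
    intro m hm
    obtain rfl : idxI n c = m := by injection hm
    exact ⟨⟨hc, hg⟩, le_refl _, c, Relation.ReflTransGen.refl, rfl⟩
  · rw [if_neg hg]
    exact ⟨fun _ hgood => hg hgood.2, fun m hm => by simp at hm⟩

theorem mem_nbrsB {c d : Int × Int} : d ∈ nbrsB c.1 c.2 ↔ isNbr c d := by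
  simp [nbrsB, isNbr]

theorem nbrMinStep_le (L : List (List (Option Int))) (n m0 : Int) (d : Int × Int) :
    nbrMinStep L n m0 d ≤ m0 := by
  unfold nbrMinStep
  split
  · cases hl : labGet L d.1 d.2 with
    | none => simp
    | some v => simp only; split <;> omega
  · exact le_refl _

theorem nbrFold_le (L : List (List (Option Int))) (n : Int) :
    ∀ (ds : List (Int × Int)) (m0 : Int), ds.foldl (nbrMinStep L n) m0 ≤ m0 := by
  intro ds
  induction ds with
  | nil => intro m0; exact le_refl _
  | cons d ds ih =>
    intro m0
    simp only [List.foldl_cons]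
    exact le_trans (ih _) (nbrMinStep_le L n m0 d)

theorem nbrFold_prov (L : List (List (Option Int))) (n : Int) :
    ∀ (ds : List (Int × Int)) (m0 : Int),
      ds.foldl (nbrMinStep L n) m0 = m0 ∨
      ∃ d ∈ ds, (0 ≤ d.1 ∧ d.1 < n ∧ 0 ≤ d.2 ∧ d.2 < n) ∧
        labGet L d.1 d.2 = some (ds.foldl (nbrMinStep L n) m0) := by
  intro ds
  induction ds with
  | nil => intro m0; exact Or.inl rfl
  | cons d ds ih =>
    intro m0
    simp only [List.foldl_cons]
    rcases ih (nbrMinStep L n m0 d) with h | ⟨e, he, hb, hl⟩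
    · rw [h]
      unfold nbrMinStep
      split
      · rename_i hbd
        cases hl : labGet L d.1 d.2 with
        | none => simp
        | some v =>
          simp only
          split
          · exact Or.inr ⟨d, List.mem_cons_self .., hbd, hl⟩
          · exact Or.inl rfl
      · exact Or.inl rfl
    · exact Or.inr ⟨e, List.mem_cons_of_mem _ he, hb, hl⟩

theorem nbrFold_le_all (L : List (List (Option Int))) (n : Int) :
    ∀ (ds : List (Int × Int)) (m0 : Int) (d : Int × Int), d ∈ ds →
      (0 ≤ d.1 ∧ d.1 < n ∧ 0 ≤ d.2 ∧ d.2 < n) → ∀ v, labGet L d.1 d.2 = some v →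
      ds.foldl (nbrMinStep L n) m0 ≤ v := by
  intro ds
  induction ds with
  | nil => intro m0 d hd; simp at hd
  | cons e es ih =>
    intro m0 d hd hb v hv
    simp only [List.foldl_cons]
    rcases List.mem_cons.mp hd with rfl | hd'
    · have hstep : nbrMinStep L n m0 d ≤ v := by
        unfold nbrMinStep
        rw [if_pos hb, hv]
        simp only
        split <;> omega
      exact le_trans (nbrFold_le L n es _) hstep
    · exact ih _ d hd' hb v hv

theorem optSum_set_lt (r : List (Option Int)) : ∀ (j : Nat) (cur v : Int),
    r[j]? = some (some cur) → v.toNat < cur.toNat →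
    ((r.set j (some v)).map (fun o => (o.getD 0).toNat)).sum
      < (r.map (fun o => (o.getD 0).toNat)).sum := by
  induction r with
  | nil => intro j cur v h; simp at h
  | cons a as ih =>
    intro j cur v h hv
    cases j with
    | zero =>
      simp at h; subst h
      simp
      omega
    | succ j =>
      simp at h
      have := ih j cur v h hv
      simp only [List.set_cons_succ, List.map_cons, List.sum_cons]
      omega

theorem sumLab_modify_lt (L : List (List (Option Int))) :
    ∀ (i : Nat) (f : List (Option Int) → List (Option Int)) (r : List (Option Int)),
    L[i]? = some r →
    ((f r).map (fun o => (o.getD 0).toNat)).sum < (r.map (fun o => (o.getD 0).toNat)).sum →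
    sumLab (L.modify i f) < sumLab L := by
  induction L with
  | nil => intro i f r hr; simp at hr
  | cons a as ih =>
    intro i f r hr hf
    cases i with
    | zero => simp at hr; subst hr; simp [sumLab, List.modify]; omega
    | succ i =>
      simp at hr
      have := ih i f r hr hf
      simp [sumLab, List.modify] at this ⊢
      omega

theorem sumLab_labSet_lt {L : List (List (Option Int))} {x y cur : Int} (m : Int)
    (hx : 0 ≤ x) (hy : 0 ≤ y) (h : labGet L x y = some cur) (hm : m.toNat < cur.toNat) :
    sumLab (labSet L x y m) < sumLab L := by
  obtain ⟨row, hrow, hcell⟩ := labGet_some_elim hx hy h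
  exact sumLab_modify_lt L x.toNat _ row hrow (optSum_set_lt row y.toNat cur m hcell hm)

theorem idxI_nonneg {n : Int} {c : Int × Int} (h : inB n c) : 0 ≤ idxI n c := by
  obtain ⟨h1, h2, h3, h4⟩ := h
  have : 0 ≤ c.1 * n := mul_nonneg h1 (by omega)
  unfold idxI
  omega

theorem foldl_grid {σ : Type} (n : Int) (f : σ → Int × Int → σ) (s : σ) :
    (PySem.List.pyRange 0 n 1).foldl
      (fun st i => (PySem.List.pyRange 0 n 1).foldl (fun st j => f st (i, j)) st) s
    = (allCells n).foldl f s := by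
  unfold allCells
  rw [List.foldl_flatMap]
  apply PySem.List.foldl_congr_mem
  intro st i _
  rw [List.foldl_map]

theorem sweepStep_cases (g : List (List Int)) (n t : Int)
    (s : List (List (Option Int)) × Bool) (c : Int × Int)
    (hInv : InvL g n t s.1) (hc : inB n c) :
    sweepStep n s c = s ∨
      ((sweepStep n s c).2 = true ∧ InvL g n t (sweepStep n s c).1 ∧
        sumLab (sweepStep n s c).1 < sumLab s.1) := by
  unfold sweepStep
  cases hl : labGet s.1 c.1 c.2 with
  | none => exact Or.inl rfl
  | some cur =>
    simp only
    by_cases hm : (nbrsB c.1 c.2).foldl (nbrMinStep s.1 n) cur < cur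
    · rw [if_pos hm]
      set m := (nbrsB c.1 c.2).foldl (nbrMinStep s.1 n) cur with hmdef
      obtain ⟨hgc, hcur_le, e₀, hce₀, hcur_eq⟩ := (hInv c hc).2 cur hl
      rcases nbrFold_prov s.1 n (nbrsB c.1 c.2) cur with hprov | ⟨d, hdmem, hdb, hld⟩
      · rw [← hmdef] at hprov; omega
      · rw [← hmdef] at hld
        have hd : inB n d := hdb
        obtain ⟨hgd, hm_le, e, hde, hm_eq⟩ := (hInv d hd).2 m hld
        have hconn_ce : conn g n t c e :=
          Relation.ReflTransGen.head ⟨hgc, hgd, mem_nbrsB.mp hdmem⟩ hde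
        have hm_nonneg : 0 ≤ m := by
          rw [hm_eq]
          exact idxI_nonneg (conn_good hde hgd).1
        refine Or.inr ⟨rfl, ?_, ?_⟩
        · intro c' hc'
          by_cases hcc : (c'.1, c'.2) = (c.1, c.2)
          · have hc'c : c' = c := by
              obtain ⟨a, b⟩ := c'; obtain ⟨a', b'⟩ := c
              simpa using hcc
            subst hc'c
            rw [labGet_labSet_same m hc.1 hc.2.2.1 hl]
            refine ⟨by simp, ?_⟩
            intro m' hm'
            obtain rfl : m = m' := by injection hm'
            exact ⟨hgc, by omega, e, hconn_ce, hm_eq⟩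
          · rw [labGet_labSet_other m hc.1 hc.2.2.1 hc'.1 hc'.2.2.1 hcc]
            exact hInv c' hc'
        · exact sumLab_labSet_lt m hc.1 hc.2.2.1 hl (by omega)
    · rw [if_neg hm]
      exact Or.inl rfl

theorem sweepFold_inv (g : List (List Int)) (n t : Int) (L : List (List (Option Int))) :
    ∀ (cs : List (Int × Int)), (∀ c ∈ cs, inB n c) →
    ∀ (s : List (List (Option Int)) × Bool),
    InvL g n t s.1 → (s.2 = false → s.1 = L) → (s.2 = true → sumLab s.1 < sumLab L) →
    InvL g n t (cs.foldl (sweepStep n) s).1 ∧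
      ((cs.foldl (sweepStep n) s).2 = false → (cs.foldl (sweepStep n) s).1 = L) ∧
      ((cs.foldl (sweepStep n) s).2 = true → sumLab (cs.foldl (sweepStep n) s).1 < sumLab L) := by
  intro cs
  induction cs with
  | nil => intro _ s h1 h2 h3; exact ⟨h1, h2, h3⟩
  | cons c cs ih =>
    intro hb s h1 h2 h3
    simp only [List.foldl_cons]
    rcases sweepStep_cases g n t s c h1 (hb c (List.mem_cons_self ..)) with heq | ⟨hfl, hI, hlt⟩
    · rw [heq]
      exact ih (fun c' hc' => hb c' (List.mem_cons_of_mem _ hc')) s h1 h2 h3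
    · refine ih (fun c' hc' => hb c' (List.mem_cons_of_mem _ hc')) _ hI ?_ ?_
      · intro h; rw [h] at hfl; exact absurd hfl (by simp)
      · intro _
        by_cases hs2 : s.2 = true
        · exact lt_trans hlt (h3 hs2)
        · have : s.1 = L := h2 (by revert hs2; cases s.2 <;> simp)
          rw [← this]; exact hlt

theorem sweepB_flat (n : Int) (L : List (List (Option Int))) :
    sweepB n L = (allCells n).foldl (sweepStep n) (L, false) :=
  foldl_grid n (sweepStep n) (L, false)

theorem sweepB_inv (g : List (List Int)) (n t : Int) (L : List (List (Option Int)))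
    (hInv : InvL g n t L) :
    InvL g n t (sweepB n L).1 ∧ ((sweepB n L).2 = false → (sweepB n L).1 = L) ∧
      ((sweepB n L).2 = true → sumLab (sweepB n L).1 < sumLab L) := by
  rw [sweepB_flat]
  exact sweepFold_inv g n t L (allCells n) (fun c hc => mem_allCells.mp hc) (L, false)
    hInv (fun _ => rfl) (by simp)

theorem sweepStep_shape (n : Int) (s : List (List (Option Int)) × Bool) (c : Int × Int) :
    sweepStep n s c = s ∨ (sweepStep n s c).2 = true := by
  unfold sweepStep
  cases labGet s.1 c.1 c.2 with
  | none => exact Or.inl rfl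
  | some cur =>
    simp only
    split
    · exact Or.inr rfl
    · exact Or.inl rfl

theorem sweepFold_flag_mono (n : Int) :
    ∀ (cs : List (Int × Int)) (s : List (List (Option Int)) × Bool),
      s.2 = true → (cs.foldl (sweepStep n) s).2 = true := by
  intro cs
  induction cs with
  | nil => intro s h; exact h
  | cons c cs ih =>
    intro s h
    simp only [List.foldl_cons]
    rcases sweepStep_shape n s c with heq | hfl
    · rw [heq]; exact ih s h
    · exact ih _ hfl

theorem stable_extract (n : Int) :
    ∀ (cs : List (Int × Int)) (L : List (List (Option Int))),
      (cs.foldl (sweepStep n) (L, false)).2 = false →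
      ∀ c ∈ cs, StableAt n L c := by
  intro cs
  induction cs with
  | nil => intro L _ c hc; simp at hc
  | cons c cs ih =>
    intro L hfin c' hc'
    simp only [List.foldl_cons] at hfin
    have hs1 : sweepStep n (L, false) c = (L, false) := by
      rcases sweepStep_shape n (L, false) c with heq | hfl
      · exact heq
      · have := sweepFold_flag_mono n cs _ hfl
        rw [this] at hfin; exact absurd hfin (by simp)
    rcases List.mem_cons.mp hc' with rfl | hc''
    · intro cur hcur d hdmem hdb v hv
      unfold sweepStep at hs1
      rw [hcur] at hs1
      simp only at hs1
      by_cases hm : (nbrsB c'.1 c'.2).foldl (nbrMinStep L n) cur < cur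
      · rw [if_pos hm] at hs1
        exact absurd (congrArg Prod.snd hs1) (by simp)
      · have := nbrFold_le_all L n (nbrsB c'.1 c'.2) cur d hdmem hdb v hv
        omega
    · rw [hs1] at hfin
      exact ih L hfin c' hc''

theorem propLoop_spec (g : List (List Int)) (n t : Int) :
    ∀ (fuel : Nat) (L : List (List (Option Int))), InvL g n t L → sumLab L < fuel →
      InvL g n t (propLoop n fuel L) ∧ ∀ c, inB n c → StableAt n (propLoop n fuel L) c := by
  intro fuel
  induction fuel with
  | zero => intro L _ h; omega
  | succ f ih =>
    intro L hInv hfuel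
    obtain ⟨hI, hFalse, hTrue⟩ := sweepB_inv g n t L hInv
    have hunf : propLoop n (f + 1) L
        = if (sweepB n L).2 then propLoop n f (sweepB n L).1 else (sweepB n L).1 := rfl
    rw [hunf]
    cases hs2 : (sweepB n L).2 with
    | true =>
      rw [if_pos rfl]
      exact ih (sweepB n L).1 hI (by have := hTrue hs2; omega)
    | false =>
      rw [if_neg (by simp)]
      have hLL : (sweepB n L).1 = L := hFalse hs2
      rw [hLL]
      refine ⟨hInv, ?_⟩
      intro c hc
      have : ((allCells n).foldl (sweepStep n) (L, false)).2 = false := by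
        rw [← sweepB_flat]; exact hs2
      have hext := stable_extract n (allCells n) L this c (mem_allCells.mpr hc)
      exact hext

theorem lab_some_of_good {g : List (List Int)} {n t : Int} {L : List (List (Option Int))}
    (hInv : InvL g n t L) {c : Int × Int} (hgc : goodP g n t c) :
    ∃ m, labGet L c.1 c.2 = some m := by
  cases hl : labGet L c.1 c.2 with
  | none => exact absurd hgc ((hInv c hgc.1).1 hl)
  | some m => exact ⟨m, rfl⟩

theorem lab_const {g : List (List Int)} {n t : Int} {L : List (List (Option Int))}
    (hInv : InvL g n t L) (hst : ∀ c, inB n c → StableAt n L c)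
    {a b : Int × Int} (h : conn g n t a b) :
    labGet L a.1 a.2 = labGet L b.1 b.2 := by
  induction h with
  | refl => rfl
  | @tail x y _ hs ih =>
    rw [ih]
    obtain ⟨hgx, hgy, hnb⟩ := hs
    obtain ⟨cx, hcx⟩ := lab_some_of_good hInv hgx
    obtain ⟨cy, hcy⟩ := lab_some_of_good hInv hgy
    have h1 : cx ≤ cy := hst x hgx.1 cx hcx y (mem_nbrsB.mpr hnb) hgy.1 cy hcy
    have h2 : cy ≤ cx := hst y hgy.1 cy hcy x (mem_nbrsB.mpr (isNbr_symm hnb)) hgx.1 cx hcx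
    rw [hcx, hcy]
    congr 1
    omega

theorem lab_char {g : List (List Int)} {n t : Int} {L : List (List (Option Int))}
    (hInv : InvL g n t L) (hst : ∀ c, inB n c → StableAt n L c) :
    ∀ c, inB n c → (labGet L c.1 c.2 = some (idxI n c) ↔ IsMinCell g n t c) := by
  intro c hc
  constructor
  · intro hsome
    have hgc : goodP g n t c := ((hInv c hc).2 _ hsome).1
    refine ⟨hgc, ?_⟩
    intro d hcd
    have hgd : goodP g n t d := conn_good hcd hgc
    have hld : labGet L d.1 d.2 = some (idxI n c) := by
      rw [← lab_const hInv hst hcd]; exact hsome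
    exact ((hInv d hgd.1).2 _ hld).2.1
  · rintro ⟨hgc, hmin⟩
    obtain ⟨m, hl⟩ := lab_some_of_good hInv hgc
    obtain ⟨_, hle, e, hce, hme⟩ := (hInv c hc).2 m hl
    have : idxI n c ≤ idxI n e := hmin e hce
    rw [hl]
    congr 1
    omega

-- ---------- assembling the two counts ----------

theorem cnt_eq (g : List (List Int)) (t : Int) :
    ((PySem.List.pyRange 0 (g.length : Int) 1).foldl
        (fun st i => (PySem.List.pyRange 0 (g.length : Int) 1).foldl (scanStepA g t i) st)
        (List.replicate g.length (List.replicate g.length false), 0)).2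
    = countLab (g.length : Int)
        (propLoop (g.length : Int) (sumLab (initLab g (g.length : Int) t) + 1)
          (initLab g (g.length : Int) t)) := by
  have hPL := propLoop_spec g (g.length : Int) t (sumLab (initLab g (g.length : Int) t) + 1)
    (initLab g (g.length : Int) t) (InvL_initLab g (g.length : Int) t) (by omega)
  obtain ⟨hInvF, hstF⟩ := hPL
  have hchar := lab_char hInvF hstF
  have hq : ∀ c, inB (g.length : Int) c →
      ((fun c => decide (labGet (propLoop (g.length : Int)
          (sumLab (initLab g (g.length : Int) t) + 1) (initLab g (g.length : Int) t))
          c.1 c.2 = some (idxI (g.length : Int) c))) c = true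
        ↔ IsMinCell g (g.length : Int) t c) := by
    intro c hc
    simp only [decide_eq_true_eq]
    exact hchar c hc
  have hM0 : ∀ d, mA (g.length : Int)
      (List.replicate g.length (List.replicate g.length false)) d
      ↔ Mpred g (g.length : Int) t [] d := by
    intro d
    constructor
    · intro h; exact absurd h (mA_init g.length d)
    · rintro ⟨_, p, hp, _⟩; simp at hp
  have hA0 : (PySem.List.pyRange 0 (g.length : Int) 1).foldl
      (fun st i => (PySem.List.pyRange 0 (g.length : Int) 1).foldl (scanStepA g t i) st)
      (List.replicate g.length (List.replicate g.length false), 0)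
      = (allCells (g.length : Int)).foldl (fun st c => scanStepA g t c.1 st c.2)
          (List.replicate g.length (List.replicate g.length false), 0) :=
    foldl_grid (g.length : Int) (fun st c => scanStepA g t c.1 st c.2)
      (List.replicate g.length (List.replicate g.length false), 0)
  have hA := scanA_inv g t _ hq (allCells (g.length : Int)) []
    (List.replicate g.length (List.replicate g.length false)) 0 (by simp) hM0
  rw [hA0, hA]
  have hB0 : countLab (g.length : Int)
      (propLoop (g.length : Int) (sumLab (initLab g (g.length : Int) t) + 1)
        (initLab g (g.length : Int) t))
      = (allCells (g.length : Int)).foldl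
          (fun acc c => if labGet (propLoop (g.length : Int)
              (sumLab (initLab g (g.length : Int) t) + 1) (initLab g (g.length : Int) t))
              c.1 c.2 = some (c.1 * (g.length : Int) + c.2) then acc + 1 else acc) 0 := by
    unfold countLab
    exact foldl_grid (g.length : Int)
      (fun acc c => if labGet (propLoop (g.length : Int)
          (sumLab (initLab g (g.length : Int) t) + 1) (initLab g (g.length : Int) t))
          c.1 c.2 = some (c.1 * (g.length : Int) + c.2) then acc + 1 else acc) 0
  rw [hB0]
  have hB1 : (allCells (g.length : Int)).foldl
      (fun acc c => if labGet (propLoop (g.length : Int)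
          (sumLab (initLab g (g.length : Int) t) + 1) (initLab g (g.length : Int) t))
          c.1 c.2 = some (c.1 * (g.length : Int) + c.2) then acc + 1 else acc) 0
      = 0 + ((allCells (g.length : Int)).countP
          (fun c => decide (labGet (propLoop (g.length : Int)
              (sumLab (initLab g (g.length : Int) t) + 1) (initLab g (g.length : Int) t))
              c.1 c.2 = some (idxI (g.length : Int) c))) : Int) := by
    rw [← PySem.List.foldl_count_if
      (fun c => decide (labGet (propLoop (g.length : Int)
          (sumLab (initLab g (g.length : Int) t) + 1) (initLab g (g.length : Int) t))
          c.1 c.2 = some (idxI (g.length : Int) c))) (allCells (g.length : Int)) 0]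
    apply PySem.List.foldl_congr_mem
    intro acc c _
    by_cases h : labGet (propLoop (g.length : Int)
        (sumLab (initLab g (g.length : Int) t) + 1) (initLab g (g.length : Int) t))
        c.1 c.2 = some (c.1 * (g.length : Int) + c.2)
    · simp [h, idxI]
    · simp [h, idxI]
  exact hB1.symm

-- ===== VERDICT (by name: the statement is the Claim_ definition above) =====
theorem count_safe_areas_spec : Claim_equal_count_safe_areas := by
  intro g mh _ _
  unfold Spec_count_safe_areas count_safe_areas count_safe_areas_alt
  dsimp only
  apply PySem.List.foldl_congr_mem
  intro best t _
  rw [cnt_eq g t]
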